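-- pv_equiv track=rewrite | github.com/quadrismegistus/adjective-reading | adjective_reading/adjective_reading.py | get_next_sentences
-- ===== SOURCE A (Python) =====
-- CONTEXT_SIZE = 100
--
-- def get_next_sentences(sentences: list[str], target_index: int, context_size: int=CONTEXT_SIZE) -> list[str]:
--     if target_index == len(sentences) - 1 or context_size == 0:
--         return []
--
--     next_sentences = []
--     word_count = 0
--
--     for i in range(target_index + 1, len(sentences)):
--         sent = sentences[i]
--         words = sent.split()
--         if word_count + len(words) <= context_size:
--             next_sentences.append(sent)
--             word_count += len(words)
--         else:
--             break
--     return next_sentences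
-- ===== SOURCE B (Python) =====
-- CONTEXT_SIZE = 100
--
-- def get_next_sentences(sentences: list[str], target_index: int, context_size: int = CONTEXT_SIZE) -> list[str]:
--     if target_index == len(sentences) - 1 or context_size == 0:
--         return []
--     candidates = [sentences[i] for i in range(target_index + 1, len(sentences))]
--     totals = []
--     running = 0
--     for s in candidates:
--         running += len(s.split())
--         totals.append(running)
--     k = 0
--     while k < len(totals) and totals[k] <= context_size:
--         k += 1
--     return candidates[:k]
-- ===== Notes on version B (the rewrite author's own statement) =====
-- stated objective: alternative
-- what changed: Replaces A's fused accumulate-and-break loop by a three-stage pipeline: materialize the candidate suffix, build a prefix-sum table of word counts, then cut the candidate list at the first cumulative total exceeding the budget.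
import Mathlib
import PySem

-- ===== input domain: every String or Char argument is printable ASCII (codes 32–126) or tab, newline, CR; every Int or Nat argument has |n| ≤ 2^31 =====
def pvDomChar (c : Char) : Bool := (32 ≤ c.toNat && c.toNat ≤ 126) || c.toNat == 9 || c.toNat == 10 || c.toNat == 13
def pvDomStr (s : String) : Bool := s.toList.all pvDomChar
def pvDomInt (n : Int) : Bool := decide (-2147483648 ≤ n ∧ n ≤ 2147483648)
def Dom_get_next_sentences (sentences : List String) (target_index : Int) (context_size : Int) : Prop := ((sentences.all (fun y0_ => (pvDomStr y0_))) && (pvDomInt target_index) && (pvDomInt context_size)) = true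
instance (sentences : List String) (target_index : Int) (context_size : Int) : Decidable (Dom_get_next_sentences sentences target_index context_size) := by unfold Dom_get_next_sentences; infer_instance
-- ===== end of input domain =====

-- B replaces A's fused accumulate-and-break loop by materialize-candidates / prefix-sum table / cut-at-first-overflow (alternative decomposition, same cost).


-- ===== PORT A =====
-- A's for-loop with break: state (word_count, next_sentences); pyGet? none = IndexError (excluded by Pre_)
def pvLoopA (sentences : List String) (context_size : Int) : List Int → Int → List String → List String
  | [], _, acc => acc
  | i :: rest, wc, acc =>
    match PySem.List.pyGet? sentences i with
    | none => acc
    | some sent =>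
      let words := PySem.Str.split₀ sent
      if wc + (words.length : Int) ≤ context_size then
        pvLoopA sentences context_size rest (wc + (words.length : Int)) (acc ++ [sent])
      else acc

def get_next_sentences (sentences : List String) (target_index : Int) (context_size : Int) : List String :=
  if target_index = (sentences.length : Int) - 1 ∨ context_size = 0 then []
  else pvLoopA sentences context_size (PySem.List.pyRange (target_index + 1) (sentences.length : Int) 1) 0 []

-- ===== PORT B =====
-- B's while loop 'k += 1 while totals[k] <= context_size' as recursion along totals
def pvCutLen (context_size : Int) : List Int → Nat
  | [] => 0
  | t :: rest => if t ≤ context_size then pvCutLen context_size rest + 1 else 0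

def get_next_sentences_alt (sentences : List String) (target_index : Int) (context_size : Int) : List String :=
  if target_index = (sentences.length : Int) - 1 ∨ context_size = 0 then []
  else
    let candidates := (PySem.List.pyRange (target_index + 1) (sentences.length : Int) 1).map
      (fun i => (PySem.List.pyGet? sentences i).getD "")
    let totals := (candidates.foldl
      (fun (st : List Int × Int) s =>
        let r := st.2 + ((PySem.Str.split₀ s).length : Int)
        (st.1 ++ [r], r)) ([], 0)).1
    candidates.take (pvCutLen context_size totals)

-- ===== PRECONDITION & SPEC =====
-- A raises IndexError exactly when context_size ≠ 0 and target_index + 1 < -len(sentences) (the first wrapped index is out of range); those inputs are excluded.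
def Pre_get_next_sentences (sentences : List String) (target_index : Int) (context_size : Int) : Prop :=
  context_size = 0 ∨ -(sentences.length : Int) ≤ target_index + 1
instance (sentences : List String) (target_index : Int) (context_size : Int) : Decidable (Pre_get_next_sentences sentences target_index context_size) := by unfold Pre_get_next_sentences; infer_instance
def pvWitness_get_next_sentences : List String × Int × Int := (["a b", "c d e", "f"], 0, 3)

def Spec_get_next_sentences (sentences : List String) (target_index : Int) (context_size : Int) (out : List String) : Prop := out = get_next_sentences_alt sentences target_index context_size
instance (sentences : List String) (target_index : Int) (context_size : Int) (out : List String) : Decidable (Spec_get_next_sentences sentences target_index context_size out) := by unfold Spec_get_next_sentences; infer_instance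

-- ===== CLAIM (what is proved, stated in full; the proofs are below) =====
def Claim_equal_get_next_sentences : Prop := ∀ (sentences : List String) (target_index : Int) (context_size : Int), Dom_get_next_sentences sentences target_index context_size → Pre_get_next_sentences sentences target_index context_size → Spec_get_next_sentences sentences target_index context_size (get_next_sentences sentences target_index context_size)

-- ===== LEMMAS AND PROOFS =====

-- word count of a sentence, as B accumulates it
def pvCnt (s : String) : Int := ((PySem.Str.split₀ s).length : Int)

-- running prefix sums starting from w (proof-side characterisation of B's totals loop)
def pvPsums (w : Int) : List String → List Int
  | [] => []
  | s :: rest => (w + pvCnt s) :: pvPsums (w + pvCnt s) rest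

theorem pvFoldl_totals (l : List String) (pre : List Int) (w : Int) :
    (l.foldl (fun (st : List Int × Int) s =>
        let r := st.2 + ((PySem.Str.split₀ s).length : Int)
        (st.1 ++ [r], r)) (pre, w)).1 = pre ++ pvPsums w l := by
  induction l generalizing pre w with
  | nil => simp [pvPsums]
  | cons s rest ih =>
    simp only [List.foldl_cons, pvPsums, pvCnt]
    rw [ih]
    simp

theorem pvLoopA_eq_cut (sentences : List String) (c : Int) (l : List Int) (wc : Int) (acc : List String)
    (h : ∀ i ∈ l, ∃ x, PySem.List.pyGet? sentences i = some x) :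
    pvLoopA sentences c l wc acc =
      acc ++ (l.map (fun i => (PySem.List.pyGet? sentences i).getD "")).take
        (pvCutLen c (pvPsums wc (l.map (fun i => (PySem.List.pyGet? sentences i).getD "")))) := by
  induction l generalizing wc acc with
  | nil => simp [pvLoopA]
  | cons i rest ih =>
    obtain ⟨x, hx⟩ := h i (List.mem_cons_self ..)
    simp only [pvLoopA, hx, List.map_cons, pvPsums, Option.getD_some, pvCnt]
    by_cases hle : wc + ((PySem.Str.split₀ x).length : Int) ≤ c
    · rw [if_pos hle, pvCutLen, if_pos hle,
        ih _ _ (fun j hj => h j (List.mem_cons_of_mem _ hj))]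
      simp
    · rw [if_neg hle, pvCutLen, if_neg hle]
      simp

-- ===== VERDICT (by name: the statement is the Claim_ definition above) =====
theorem get_next_sentences_spec : Claim_equal_get_next_sentences := by
  intro sentences target_index context_size _ hpre
  unfold Spec_get_next_sentences get_next_sentences get_next_sentences_alt
  by_cases hg : target_index = (sentences.length : Int) - 1 ∨ context_size = 0
  · simp [hg]
  · rw [if_neg hg, if_neg hg]
    have hc : context_size ≠ 0 := fun h => hg (Or.inr h)
    have hlo : -(sentences.length : Int) ≤ target_index + 1 := by
      rcases hpre with h | h
      · exact absurd h hc
      · exact h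
    have hvalid : ∀ i ∈ PySem.List.pyRange (target_index + 1) (sentences.length : Int) 1,
        ∃ x, PySem.List.pyGet? sentences i = some x := by
      intro i hi
      rw [PySem.List.mem_pyRange_one] at hi
      have hin : PySem.Raise.InRange sentences.length i := by
        constructor <;> omega
      rcases hpg : PySem.List.pyGet? sentences i with _ | x
      · rw [PySem.List.pyGet?_eq_none_iff] at hpg
        exact absurd hin hpg
      · exact ⟨x, rfl⟩
    rw [pvLoopA_eq_cut _ _ _ _ _ hvalid]
    simp only [pvFoldl_totals, List.nil_append]
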